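-- pv_equiv track=rewrite | github.com/kgryczan/excelbi_puzzles | Excel/800-899/862/862 Challenge.py | max_repeated_block_length
-- ===== SOURCE A (Python) =====
-- def max_repeated_block_length(seq):
--     max_length = 1
--     for block_size in range(1, len(seq) + 1):
--         count, block, max_possible = 1, seq[-block_size:], len(seq) // block_size
--         if max_possible <= max_length:
--             return max_length
--         while seq[-(count + 1) * block_size : -count * block_size] == block:
--             count += 1
--         max_length = max(max_length, count)
-- ===== SOURCE B (Python) =====
-- def _lcp(xs, ys):
--     k = 0
--     for x, y in zip(xs, ys):
--         if x != y:
--             break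
--         k += 1
--     return k
--
--
-- def max_repeated_block_length(seq):
--     r = seq[::-1]
--     n = len(r)
--     best = 1
--     for bs in range(1, n + 1):
--         m = _lcp(r, r[bs:])
--         best = max(best, 1 + m // bs)
--     return best
-- ===== Notes on version B (the rewrite author's own statement) =====
-- stated objective: alternative
-- what changed: B reverses the sequence once and, for each block size bs, computes a single element-wise longest-common-prefix length m of the reversed list with its bs-shift and obtains the repetition count by the closed formula 1 + m//bs, instead of A's repeated whole-block slice comparisons with an early-return pruning on len(seq)//bs.
-- outside the precondition, e.g. on max_repeated_block_length([]): A returns None, B returns 1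
import Mathlib
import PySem

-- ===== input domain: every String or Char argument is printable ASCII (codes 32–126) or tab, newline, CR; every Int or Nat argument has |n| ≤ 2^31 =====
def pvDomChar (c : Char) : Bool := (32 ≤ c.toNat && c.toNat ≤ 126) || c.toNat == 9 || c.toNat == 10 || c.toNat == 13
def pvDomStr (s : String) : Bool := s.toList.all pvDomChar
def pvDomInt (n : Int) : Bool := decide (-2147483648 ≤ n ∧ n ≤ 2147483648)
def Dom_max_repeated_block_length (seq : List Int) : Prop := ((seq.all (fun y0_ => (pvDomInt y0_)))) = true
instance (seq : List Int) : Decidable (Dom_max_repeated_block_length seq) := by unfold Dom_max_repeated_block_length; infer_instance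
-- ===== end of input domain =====

-- B replaces A's repeated whole-block slice comparisons (with an early-return pruning) by one
-- longest-common-prefix scan per block size on the reversed list and the closed formula 1 + m // bs
-- (objective: alternative; same asymptotic cost).

-- ===== PORT A =====
-- the inner 'while seq[-(count+1)*block_size : -count*block_size] == block: count += 1' (fuel is a totality guard only)
def pvAWhile (seq : List Int) (block : List Int) (blockSize : Int) : Nat → Int → Int
  | 0, count => count
  | fuel + 1, count =>
    if PySem.List.slice seq (some (-(count + 1) * blockSize)) (some (-count * blockSize)) = block
    then pvAWhile seq block blockSize fuel (count + 1)
    else count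

-- the 'for block_size in range(1, len(seq)+1)' loop with its early return
def pvALoop (seq : List Int) : List Int → Int → Int
  | [], maxLength => maxLength   -- Python falls off the loop (returning None) only for seq = []; excluded by Pre_
  | blockSize :: rest, maxLength =>
    let block := PySem.List.slice seq (some (-blockSize)) none
    let maxPossible := PySem.Int.floordiv (seq.length : Int) blockSize
    if maxPossible ≤ maxLength then maxLength
    else pvALoop seq rest (max maxLength (pvAWhile seq block blockSize (seq.length + 1) 1))

def max_repeated_block_length (seq : List Int) : Int :=
  pvALoop seq (PySem.List.pyRange 1 ((seq.length : Int) + 1) 1) 1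

-- ===== PORT B =====
-- _lcp: length of the longest common prefix (the zip/break loop of Source B)
def pvLcp : List Int → List Int → Nat
  | x :: xs, y :: ys => if x = y then pvLcp xs ys + 1 else 0
  | _, _ => 0

def max_repeated_block_length_alt (seq : List Int) : Int :=
  let r := seq.reverse
  let n := r.length
  (List.range' 1 n).foldl
    (fun best bs => max best (1 + ((pvLcp r (r.drop bs) / bs : Nat) : Int))) 1

-- ===== PRECONDITION & SPEC =====
-- Pre_ excludes only the empty list, on which Python A falls through its loop and returns None (not an int).
def Pre_max_repeated_block_length (seq : List Int) : Prop := seq ≠ []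
instance (seq : List Int) : Decidable (Pre_max_repeated_block_length seq) := by unfold Pre_max_repeated_block_length; infer_instance
def pvWitness_max_repeated_block_length : List Int := [1, 2, 1, 2]

def Spec_max_repeated_block_length (seq : List Int) (out : Int) : Prop := out = max_repeated_block_length_alt seq
instance (seq : List Int) (out : Int) : Decidable (Spec_max_repeated_block_length seq out) := by unfold Spec_max_repeated_block_length; infer_instance

-- ===== CLAIM (what is proved, stated in full; the proofs are below) =====
def Claim_equal_max_repeated_block_length : Prop := ∀ (seq : List Int), Dom_max_repeated_block_length seq → Pre_max_repeated_block_length seq → Spec_max_repeated_block_length seq (max_repeated_block_length seq)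

-- ===== LEMMAS AND PROOFS =====

theorem pvLcp_le_right (xs ys : List Int) : pvLcp xs ys ≤ ys.length := by
  induction xs generalizing ys with
  | nil => simp [pvLcp]
  | cons x xs ih =>
    cases ys with
    | nil => simp [pvLcp]
    | cons y ys =>
      by_cases h : x = y <;> simp [pvLcp, h]
      exact ih ys

theorem pvLcp_getElem? (xs ys : List Int) (i : Nat) (h : i < pvLcp xs ys) : xs[i]? = ys[i]? := by
  induction xs generalizing ys i with
  | nil => simp [pvLcp] at h
  | cons x xs ih =>
    cases ys with
    | nil => simp [pvLcp] at h
    | cons y ys =>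
      by_cases hxy : x = y
      · cases i with
        | zero => simp [hxy]
        | succ i =>
          simp only [List.getElem?_cons_succ]
          exact ih ys i (by simp [pvLcp, hxy] at h; omega)
      · simp [pvLcp, hxy] at h

theorem le_pvLcp (xs ys : List Int) (k : Nat) (hx : k ≤ xs.length) (hy : k ≤ ys.length)
    (h : ∀ i, i < k → xs[i]? = ys[i]?) : k ≤ pvLcp xs ys := by
  induction xs generalizing ys k with
  | nil => simp at hx; omega
  | cons x xs ih =>
    cases k with
    | zero => omega
    | succ k =>
      cases ys with
      | nil => simp at hy
      | cons y ys =>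
        have h0 := h 0 (by omega)
        simp at h0
        simp [pvLcp, h0]
        exact ih ys k (by simpa using hx) (by simpa using hy)
          (fun i hi => by simpa using h (i + 1) (by omega))

-- Python's seq[-(i+j):-i] (0 < i) is the reversed segment [i, i+j) of the reversed list
theorem pvRevSeg (xs : List Int) (i j : Nat) (hi : 0 < i) :
    PySem.List.slice xs (some (-(i + j : Nat))) (some (-(i : Nat))) =
      ((xs.reverse.drop i).take j).reverse := by
  simp only [PySem.List.slice, PySem.List.clampIdx_neg_natCast xs.length (i + j) (by omega),
    PySem.List.clampIdx_neg_natCast xs.length i hi]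
  rw [List.drop_reverse, List.take_reverse, List.reverse_reverse, List.length_take,
    List.drop_take]
  have h1 : min (xs.length - i) xs.length = xs.length - i := by omega
  have h2 : xs.length - i - j = xs.length - (i + j) := by omega
  rw [h1, h2]

-- Python's seq[-k:] (0 < k) is the reversed first k elements of the reversed list
theorem pvRevSuffix (xs : List Int) (k : Nat) (hk : 0 < k) :
    PySem.List.slice xs (some (-(k : Nat))) none = (xs.reverse.take k).reverse := by
  rw [PySem.List.slice_from_neg_natCast xs k hk, List.take_reverse, List.reverse_reverse]

theorem pvStep (r : List Int) (bs : Nat) (t k : Nat) (hk : k < bs)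
    (ht : t * bs ≤ pvLcp r (r.drop bs)) : r[t * bs + k]? = r[k]? := by
  induction t with
  | zero => simp
  | succ t ih =>
    have htm : t * bs ≤ pvLcp r (r.drop bs) := le_trans (by nlinarith) ht
    have hi : t * bs + k < pvLcp r (r.drop bs) := by nlinarith
    have h1 := pvLcp_getElem? r (r.drop bs) (t * bs + k) hi
    rw [List.getElem?_drop] at h1
    have he : bs + (t * bs + k) = (t + 1) * bs + k := by ring
    rw [he] at h1
    rw [← h1]
    exact ih htm

-- the periodicity bridge: all blocks 1..c equal block 0 iff the lcp with the bs-shift reaches c*bs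
theorem pvChain (r : List Int) (bs : Nat) (hbs : 0 < bs) (hbn : bs ≤ r.length) (c : Nat) :
    (∀ j, 0 < j → j ≤ c → (r.drop (j * bs)).take bs = r.take bs) ↔
      c * bs ≤ pvLcp r (r.drop bs) := by
  constructor
  · intro H
    cases c with
    | zero => simp
    | succ c =>
      have hlen : (c + 1) * bs + bs ≤ r.length := by
        have := congrArg List.length (H (c + 1) (by omega) le_rfl)
        simp [List.length_take, List.length_drop] at this
        omega
      apply le_pvLcp
      · omega
      · simp [List.length_drop]; omega
      · intro i hic
        have hH : ∀ j, j ≤ c + 1 → ∀ k, k < bs → r[j * bs + k]? = r[k]? := by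
          intro j hjc k hk
          cases Nat.eq_zero_or_pos j with
          | inl h0 => simp [h0]
          | inr hj0 =>
            have := congrArg (fun l => l[k]?) (H j hj0 hjc)
            simpa [List.getElem?_take, List.getElem?_drop, hk] using this
        have hk : i % bs < bs := Nat.mod_lt _ hbs
        have hi2 : (i / bs) * bs + i % bs = i := by
          rw [Nat.mul_comm]; exact Nat.div_add_mod i bs
        have htc : i / bs < c + 1 := (Nat.div_lt_iff_lt_mul hbs).mpr hic
        rw [List.getElem?_drop]
        have l1 := hH (i / bs) (by omega) (i % bs) hk
        rw [hi2] at l1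
        have l2 := hH (i / bs + 1) (by omega) (i % bs) hk
        have e2 : (i / bs + 1) * bs + i % bs = bs + i := by
          conv_rhs => rw [← hi2]
          ring
        rw [e2] at l2
        rw [l1, ← l2]
  · intro hm j hj0 hjc
    apply List.ext_getElem?
    intro k
    rw [List.getElem?_take, List.getElem?_take]
    by_cases hk : k < bs
    · simp only [if_pos hk, List.getElem?_drop]
      exact pvStep r bs j k hk (le_trans (Nat.mul_le_mul_right bs hjc) hm)
    · simp [hk]

theorem pvAWhile_go (seq : List Int) (bs : Nat) (hbs : 0 < bs) (hbn : bs ≤ seq.length) :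
    ∀ (fuel c : Nat), 0 < c → c ≤ 1 + pvLcp seq.reverse (seq.reverse.drop bs) / bs →
      1 + pvLcp seq.reverse (seq.reverse.drop bs) / bs ≤ c + fuel →
      pvAWhile seq ((seq.reverse.take bs).reverse) (bs : Int) fuel (c : Int) =
        ((1 + pvLcp seq.reverse (seq.reverse.drop bs) / bs : Nat) : Int) := by
  set r := seq.reverse with hr
  set m := pvLcp r (r.drop bs) with hm
  have hbnr : bs ≤ r.length := by simpa [hr] using hbn
  intro fuel
  induction fuel with
  | zero =>
    intro c hc0 hcle hle
    have : c = 1 + m / bs := by omega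
    simp [pvAWhile, this]
  | succ fuel ih =>
    intro c hc0 hcle hle
    have hcond : (PySem.List.slice seq (some (-((c : Int) + 1) * (bs : Int)))
        (some (-(c : Int) * (bs : Int))) = (r.take bs).reverse) ↔
        ((r.drop (c * bs)).take bs = r.take bs) := by
      have e1 : (-((c : Int) + 1) * (bs : Int)) = -((c * bs + bs : Nat) : Int) := by push_cast; ring
      have e2 : (-(c : Int) * (bs : Int)) = -((c * bs : Nat) : Int) := by push_cast; ring
      rw [e1, e2]
      have := pvRevSeg seq (c * bs) bs (by positivity)
      rw [this, ← hr, List.reverse_inj]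
    rcases Nat.lt_or_ge c (1 + m / bs) with hlt | hge
    · have htake : (r.drop (c * bs)).take bs = r.take bs := by
        have hcm : c * bs ≤ m := by
          have : c ≤ m / bs := by omega
          exact (Nat.le_div_iff_mul_le hbs).mp this
        exact ((pvChain r bs hbs hbnr c).mpr hcm) c hc0 le_rfl
      rw [pvAWhile, if_pos (hcond.mpr htake)]
      have : ((c : Int) + 1) = ((c + 1 : Nat) : Int) := by push_cast; ring
      rw [this]
      exact ih (c + 1) (by omega) (by omega) (by omega)
    · have hceq : c = 1 + m / bs := by omega
      have hntake : ¬ ((r.drop (c * bs)).take bs = r.take bs) := by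
        intro htk
        have H : ∀ j, 0 < j → j ≤ c → (r.drop (j * bs)).take bs = r.take bs := by
          intro j hj0 hjc
          rcases Nat.lt_or_ge j c with hjlt | hjge
          · have hstep : (c - 1) * bs ≤ m := by
              have : c - 1 = m / bs := by omega
              rw [this]
              exact Nat.div_mul_le_self m bs
            exact ((pvChain r bs hbs hbnr (c - 1)).mpr hstep) j hj0 (by omega)
          · have : j = c := by omega
            rw [this]; exact htk
        have := (pvChain r bs hbs hbnr c).mp H
        have : c ≤ m / bs := (Nat.le_div_iff_mul_le hbs).mpr this
        omega
      rw [pvAWhile, if_neg (fun h => hntake (hcond.mp h)), hceq]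

-- A's inner while loop computes 1 + m // bs
theorem pvAWhile_eq (seq : List Int) (bs : Nat) (hbs : 0 < bs) (hbn : bs ≤ seq.length) :
    pvAWhile seq (PySem.List.slice seq (some (-(bs : Nat))) none) (bs : Int) (seq.length + 1) 1 =
      ((1 + pvLcp seq.reverse (seq.reverse.drop bs) / bs : Nat) : Int) := by
  rw [pvRevSuffix seq bs hbs]
  have hmn : pvLcp seq.reverse (seq.reverse.drop bs) ≤ seq.length := by
    have := pvLcp_le_right seq.reverse (seq.reverse.drop bs)
    simp [List.length_drop] at this
    omega
  have hdiv : pvLcp seq.reverse (seq.reverse.drop bs) / bs ≤ seq.length :=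
    le_trans (Nat.div_le_self _ _) hmn
  have h3 : 1 + pvLcp seq.reverse (seq.reverse.drop bs) / bs ≤ 1 + (seq.length + 1) :=
    Nat.add_le_add le_rfl (le_trans hdiv (Nat.le_succ _))
  have := pvAWhile_go seq bs hbs hbn (seq.length + 1) 1 (by omega) (Nat.le_add_right 1 _) h3
  simpa using this

-- the count for block size bs never exceeds len(seq) // bs
theorem pvCnt_le (seq : List Int) (bs : Nat) (hbs : 0 < bs) (hbn : bs ≤ seq.length) :
    1 + pvLcp seq.reverse (seq.reverse.drop bs) / bs ≤ seq.length / bs := by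
  have hm : pvLcp seq.reverse (seq.reverse.drop bs) ≤ seq.length - bs := by
    have := pvLcp_le_right seq.reverse (seq.reverse.drop bs)
    simpa [List.length_drop] using this
  have h1 : pvLcp seq.reverse (seq.reverse.drop bs) / bs ≤ (seq.length - bs) / bs :=
    Nat.div_le_div_right hm
  have h2 : (seq.length - bs) / bs + 1 = seq.length / bs := by
    rw [← Nat.add_div_right _ hbs, Nat.sub_add_cancel hbn]
  omega

theorem pvFoldlMax_of_le (l : List Nat) (f : Nat → Int) (acc : Int) (h : ∀ x ∈ l, f x ≤ acc) :
    l.foldl (fun b x => max b (f x)) acc = acc := by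
  induction l with
  | nil => rfl
  | cons x l ih =>
    simp only [List.foldl_cons]
    rw [max_eq_left (h x (by simp))]
    exact ih (fun y hy => h y (by simp [hy]))

-- A's outer loop (with its early return) equals B's fold over the remaining block sizes
theorem pvLoop_eq (seq : List Int) : ∀ (k : Nat) (bs0 : Nat), 0 < bs0 → bs0 + k = seq.length + 1 →
    ∀ acc : Int, 1 ≤ acc →
    pvALoop seq (PySem.List.pyRange (bs0 : Nat) ((seq.length : Int) + 1) 1) acc =
      (List.range' bs0 k).foldl
        (fun b bs => max b (1 + ((pvLcp seq.reverse (seq.reverse.drop bs) / bs : Nat) : Int))) acc := by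
  intro k
  induction k with
  | zero =>
    intro bs0 hbs0 hsum acc hacc
    rw [PySem.List.pyRange_one_eq_nil (by omega)]
    rfl
  | succ k ih =>
    intro bs0 hbs0 hsum acc hacc
    have hbs0n : bs0 ≤ seq.length := by omega
    rw [PySem.List.pyRange_one_cons (by omega)]
    show pvALoop seq (_ :: _) acc = _
    rw [List.range'_succ]
    simp only [pvALoop, List.foldl_cons]
    rw [PySem.Int.floordiv_natCast seq.length bs0]
    by_cases hle : ((seq.length / bs0 : Nat) : Int) ≤ acc
    · rw [if_pos hle]
      rw [pvFoldlMax_of_le _ _ _ ?_]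
      · rw [max_eq_left]
        calc (1 : Int) + ((pvLcp seq.reverse (seq.reverse.drop bs0) / bs0 : Nat) : Int)
            = ((1 + pvLcp seq.reverse (seq.reverse.drop bs0) / bs0 : Nat) : Int) := by push_cast; ring
          _ ≤ ((seq.length / bs0 : Nat) : Int) := by
              exact_mod_cast pvCnt_le seq bs0 hbs0 hbs0n
          _ ≤ acc := hle
      · intro bs hbs
        rw [List.mem_range'] at hbs
        obtain ⟨i, hik, hbse⟩ := hbs
        have hbs0bs : bs0 ≤ bs := by omega
        have hbsn : bs ≤ seq.length := by omega
        have hbspos : 0 < bs := by omega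
        calc (1 : Int) + ((pvLcp seq.reverse (seq.reverse.drop bs) / bs : Nat) : Int)
            = ((1 + pvLcp seq.reverse (seq.reverse.drop bs) / bs : Nat) : Int) := by push_cast; ring
          _ ≤ ((seq.length / bs : Nat) : Int) := by exact_mod_cast pvCnt_le seq bs hbspos hbsn
          _ ≤ ((seq.length / bs0 : Nat) : Int) := by
              exact_mod_cast Nat.div_le_div_left hbs0bs hbs0
          _ ≤ acc := hle
          _ ≤ max acc (1 + ((pvLcp seq.reverse (seq.reverse.drop bs0) / bs0 : Nat) : Int)) :=
              le_max_left _ _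
    · rw [if_neg hle]
      rw [pvAWhile_eq seq bs0 hbs0 hbs0n]
      have e1 : ((bs0 : Int) + 1) = ((bs0 + 1 : Nat) : Int) := by push_cast; ring
      have e2 : ((1 + pvLcp seq.reverse (seq.reverse.drop bs0) / bs0 : Nat) : Int) =
          1 + ((pvLcp seq.reverse (seq.reverse.drop bs0) / bs0 : Nat) : Int) := by push_cast; ring
      rw [e1, e2]
      exact ih (bs0 + 1) (by omega) (by omega) _ (le_trans hacc (le_max_left _ _))

-- ===== VERDICT (by name: the statement is the Claim_ definition above) =====
theorem max_repeated_block_length_spec : Claim_equal_max_repeated_block_length := by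
  intro seq _ _
  unfold Spec_max_repeated_block_length max_repeated_block_length max_repeated_block_length_alt
  have h := pvLoop_eq seq seq.length 1 (by omega) (by omega) 1 le_rfl
  simp only [Nat.cast_one] at h
  rw [h]
  simp
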